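-- pv_equiv track=rewrite | github.com/ktsun2016/python_scripts | check_pair.py | check_pair
-- ===== SOURCE A (Python) =====
-- def check_pair(s):
--     '''
--     task1: check the total number of element in this string is
--            even, otherwise it should fail.
--     '''
--     if len(s)%2 !=0:
--         return False
--     else:
--         pass
--
--     '''
--     task2: locate the index of the two symbols of each pair and check
--            1. same occurance
--            2. the index of leading symbol is less than its pair symbol
--     '''
--
--     s1=list(s)
--     # task 2.1 for "(" and ")"
--     if "(" in s1 and ")" in s1:
--         l1=[i for i, x in enumerate(s1) if x == "("]
--         l2=[i for i, x in enumerate(s1) if x == ")"]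
--         if len(l1)!=len(l2):
--             return False
--         else:
--             for i in range(len(l1)):
--                 if l1[i] > l2[i]:
--                     return False
--                 else:
--                     pass
--
--     # task 2.1 for "[" and "]"
--     if "[" in s1 and "]" in s1:
--         l3=[i for i, x in enumerate(s1) if x == "["]
--         l4=[i for i, x in enumerate(s1) if x == "]"]
--         if len(l3)!=len(l4):
--             return False
--         else:
--             for i in range(len(l3)):
--                 if l3[i] > l4[i]:
--                     return False
--                 else:
--                     pass
--
--     # task 2.1 for "{" and "}"
--     if "{" in s1 and "}" in s1:
--         l5=[i for i, x in enumerate(s1) if x == "{"]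
--         l6=[i for i, x in enumerate(s1) if x == "}"]
--         if len(l5)!=len(l6):
--             return False
--         else:
--             for i in range(len(l5)):
--                 if l5[i] > l6[i]:
--                     return False
--                 else:
--                     pass
--     return True
--
-- s='{}()[]'
-- ===== SOURCE B (Python) =====
-- def check_pair(s):
--     if len(s) % 2 != 0:
--         return False
--     for o, c in (('(', ')'), ('[', ']'), ('{', '}')):
--         if o in s and c in s:
--             depth = 0
--             for ch in s:
--                 if ch == o:
--                     depth += 1
--                 elif ch == c:
--                     depth -= 1
--                     if depth < 0:
--                         return False
--             if depth != 0:
--                 return False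
--     return True
-- ===== Notes on version B (the rewrite author's own statement) =====
-- stated objective: idiomatic
-- what changed: Replaces building two index lists per bracket type and comparing them element-wise with a single left-to-right prefix-balance (depth counter) scan per bracket type, keeping A's odd-length and both-symbols-present guards.
import Mathlib
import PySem

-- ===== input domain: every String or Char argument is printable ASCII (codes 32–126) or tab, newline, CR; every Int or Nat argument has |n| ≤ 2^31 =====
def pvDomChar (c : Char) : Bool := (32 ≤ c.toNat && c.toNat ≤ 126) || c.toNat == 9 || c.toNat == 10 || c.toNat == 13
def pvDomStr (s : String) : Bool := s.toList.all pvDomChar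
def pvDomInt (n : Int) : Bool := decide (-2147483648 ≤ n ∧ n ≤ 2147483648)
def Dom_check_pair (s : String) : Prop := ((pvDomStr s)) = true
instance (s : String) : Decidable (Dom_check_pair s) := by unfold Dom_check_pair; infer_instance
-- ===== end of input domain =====

-- B replaces A's per-type index-list construction and element-wise comparison by a
-- per-type prefix-balance (depth) scan; same guards, provably equal results.

-- ===== PORT A =====
-- 'for i in range(len(l1)): if l1[i] > l2[i]: return False' — after the length check the
-- lists have equal length, so the index loop is the obvious simultaneous recursion.
def pvLoopA : List Int → List Int → Bool
  | i :: is, j :: js => if i > j then false else pvLoopA is js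
  | _, _ => true

-- one of A's three identical inline blocks (A repeats this code for each bracket type)
def pvBlockA (s1 : List Char) (o c : Char) : Bool :=
  if o ∈ s1 ∧ c ∈ s1 then
    let l1 := ((PySem.List.enumerate s1 0).filter (fun p => p.2 == o)).map (·.1)
    let l2 := ((PySem.List.enumerate s1 0).filter (fun p => p.2 == c)).map (·.1)
    if l1.length != l2.length then false else pvLoopA l1 l2
  else true

def check_pair (s : String) : Bool :=
  if PySem.Int.mod (PySem.Str.len s) 2 != 0 then false
  else
    let s1 := s.toList
    pvBlockA s1 '(' ')' && pvBlockA s1 '[' ']' && pvBlockA s1 '{' '}'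

-- ===== PORT B =====
-- the inner 'for ch in s' depth scan of Source B
def pvScan (o c : Char) (cs : List Char) (depth : Int) : Bool :=
  match cs with
  | [] => depth == 0
  | ch :: rest =>
    if ch == o then pvScan o c rest (depth + 1)
    else if ch == c then
      if depth - 1 < 0 then false else pvScan o c rest (depth - 1)
    else pvScan o c rest depth

def check_pair_alt (s : String) : Bool :=
  if PySem.Int.mod (PySem.Str.len s) 2 != 0 then false
  else
    let cs := s.toList
    [('(', ')'), ('[', ']'), ('{', '}')].all fun p =>
      if p.1 ∈ cs ∧ p.2 ∈ cs then pvScan p.1 p.2 cs 0 else true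

-- ===== PRECONDITION & SPEC =====
def Spec_check_pair (s : String) (out : Bool) : Prop := out = check_pair_alt s
instance (s : String) (out : Bool) : Decidable (Spec_check_pair s out) := by unfold Spec_check_pair; infer_instance

-- ===== CLAIM (what is proved, stated in full; the proofs are below) =====
def Claim_equal_check_pair : Prop := ∀ (s : String), Dom_check_pair s → Spec_check_pair s (check_pair s)

-- ===== LEMMAS AND PROOFS =====

-- index list of occurrences of ch, enumerated from start t
def pvIdx (ch : Char) (cs : List Char) (t : Int) : List Int :=
  ((PySem.List.enumerate cs t).filter (fun p => p.2 == ch)).map (·.1)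

theorem pvIdx_nil (ch : Char) (t : Int) : pvIdx ch [] t = [] := by
  simp [pvIdx, PySem.List.enumerate_nil]

theorem pvIdx_cons_self (ch : Char) (cs : List Char) (t : Int) :
    pvIdx ch (ch :: cs) t = t :: pvIdx ch cs (t + 1) := by
  simp [pvIdx, PySem.List.enumerate_cons]

theorem pvIdx_cons_ne {x ch : Char} (h : x ≠ ch) (cs : List Char) (t : Int) :
    pvIdx ch (x :: cs) t = pvIdx ch cs (t + 1) := by
  simp [pvIdx, PySem.List.enumerate_cons, h]

theorem pvIdx_length (ch : Char) (cs : List Char) (t : Int) :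
    (pvIdx ch cs t).length = cs.count ch := by
  induction cs generalizing t with
  | nil => simp [pvIdx_nil]
  | cons x cs ih =>
    by_cases h : x = ch
    · subst h; rw [pvIdx_cons_self]; simp [ih]
    · rw [pvIdx_cons_ne h]; simp [ih, h]

theorem pvIdx_ge (ch : Char) (cs : List Char) (t : Int) :
    ∀ y ∈ pvIdx ch cs t, t ≤ y := by
  induction cs generalizing t with
  | nil => simp [pvIdx_nil]
  | cons x cs ih =>
    intro y hy
    by_cases h : x = ch
    · subst h
      rw [pvIdx_cons_self] at hy
      rcases List.mem_cons.mp hy with h' | h'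
      · omega
      · have := ih (t + 1) y h'; omega
    · rw [pvIdx_cons_ne h] at hy
      have := ih (t + 1) y hy; omega

theorem pvLoopA_nil_right (l : List Int) : pvLoopA l [] = true := by
  cases l <;> rfl

theorem pvScan_cons_open (o c : Char) (cs : List Char) (d : Int) :
    pvScan o c (o :: cs) d = pvScan o c cs (d + 1) := by
  simp [pvScan]

theorem pvScan_cons_close (o c : Char) (h : ¬ c = o) (cs : List Char) (d : Int) (hd : 0 ≤ d) :
    pvScan o c (c :: cs) (d + 1) = pvScan o c cs d := by
  have h1 : (c == o) = false := by simp [h]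
  have h2 : d + 1 - 1 = d := by ring
  simp only [pvScan, h1, Bool.false_eq_true, if_false, BEq.rfl, if_true, h2]
  rw [if_neg (by omega)]

theorem pvScan_cons_close_zero (o c : Char) (h : ¬ c = o) (cs : List Char) :
    pvScan o c (c :: cs) 0 = false := by
  have h1 : (c == o) = false := by simp [h]
  simp only [pvScan, h1, Bool.false_eq_true, if_false, BEq.rfl, if_true]
  rw [if_pos (by omega)]

theorem pvScan_cons_other (o c x : Char) (h1 : ¬ x = o) (h2 : ¬ x = c) (cs : List Char) (d : Int) :
    pvScan o c (x :: cs) d = pvScan o c cs d := by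
  simp [pvScan, h1, h2]

-- main invariant: the depth scan started at depth d equals A's check with the first d
-- closing indices already matched to earlier (smaller) opening indices
theorem pvScan_eq (o c : Char) (hoc : o ≠ c) (cs : List Char) (t : Int) (d : Nat) :
    pvScan o c cs (d : Int) =
      (decide ((cs.count o : Int) + d = cs.count c) &&
        pvLoopA (pvIdx o cs t) ((pvIdx c cs t).drop d)) := by
  induction cs generalizing t d with
  | nil =>
    simp only [pvScan, pvIdx_nil, List.drop_nil, pvLoopA_nil_right, Bool.and_true,
      List.count_nil, Nat.cast_zero]
    have h : ((0 : Int) + (d : Int) = 0) ↔ (((d : Int)) == 0) = true := by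
      rw [beq_iff_eq]; omega
    rw [Bool.eq_iff_iff, decide_eq_true_eq, ← h]
  | cons x cs ih =>
    by_cases hxo : x = o
    · subst hxo
      have hxc : x ≠ c := hoc
      have h1 : pvScan x c (x :: cs) (d : Int) = pvScan x c cs ((d + 1 : Nat) : Int) := by
        rw [pvScan_cons_open]
        push_cast
        ring_nf
      have hA : (x :: cs).count x = cs.count x + 1 := by simp
      have hB : (x :: cs).count c = cs.count c := by simp [hxc]
      rw [h1, ih (t + 1) (d + 1), pvIdx_cons_self, pvIdx_cons_ne hxc, hA, hB]
      rcases hdrop : (pvIdx c cs (t + 1)).drop d with _ | ⟨y, ys⟩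
      · have hd1 : (pvIdx c cs (t + 1)).drop (d + 1) = [] := by
          rw [← List.drop_drop, hdrop]; rfl
        rw [hd1, pvLoopA_nil_right, pvLoopA_nil_right]
        congr 1
        apply decide_eq_decide.mpr
        push_cast
        omega
      · have hyy : t + 1 ≤ y := by
          apply pvIdx_ge c cs (t + 1)
          exact List.mem_of_mem_drop (by rw [hdrop]; exact List.mem_cons_self)
        have hd1 : (pvIdx c cs (t + 1)).drop (d + 1) = ys := by
          rw [← List.drop_drop, hdrop]; rfl
        rw [hd1]
        have hstep : pvLoopA (t :: pvIdx x cs (t + 1)) (y :: ys) = pvLoopA (pvIdx x cs (t + 1)) ys := by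
          simp only [pvLoopA]
          rw [if_neg (by omega)]
        rw [hstep]
        congr 1
        apply decide_eq_decide.mpr
        push_cast
        omega
    · by_cases hxc : x = c
      · subst hxc
        have hA : (x :: cs).count o = cs.count o := by simp [hxo]
        have hB : (x :: cs).count x = cs.count x + 1 := by simp
        rw [pvIdx_cons_ne hxo, pvIdx_cons_self, hA, hB]
        match d with
        | 0 =>
          have h1 : pvScan o x (x :: cs) ((0 : Nat) : Int) = false := by
            rw [Nat.cast_zero, pvScan_cons_close_zero o x hxo]
          rw [h1, List.drop_zero]
          rcases hl : pvIdx o cs (t + 1) with _ | ⟨a, as⟩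
          · have hzero : cs.count o = 0 := by
              have hlen := pvIdx_length o cs (t + 1)
              rw [hl] at hlen
              simpa using hlen.symm
            have hdec : ¬ ((cs.count o : Int) + ((0 : Nat) : Int) = ((cs.count x + 1 : Nat) : Int)) := by
              rw [hzero]
              push_cast
              omega
            rw [decide_eq_false hdec, Bool.false_and]
          · have hat : t + 1 ≤ a := by
              apply pvIdx_ge o cs (t + 1)
              rw [hl]; exact List.mem_cons_self
            have hLA : pvLoopA (a :: as) (t :: pvIdx x cs (t + 1)) = false := by
              simp only [pvLoopA]
              rw [if_pos (by omega)]
            rw [hLA, Bool.and_false]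
        | Nat.succ k =>
          have h1 : pvScan o x (x :: cs) ((k + 1 : Nat) : Int) = pvScan o x cs ((k : Nat) : Int) := by
            have : ((k + 1 : Nat) : Int) = (k : Int) + 1 := by push_cast; ring
            rw [this, pvScan_cons_close o x hxo cs (k : Int) (by positivity)]
          have hd1 : (t :: pvIdx x cs (t + 1)).drop (k + 1) = (pvIdx x cs (t + 1)).drop k := rfl
          rw [h1, ih (t + 1) k, hd1]
          congr 1
          apply decide_eq_decide.mpr
          push_cast
          omega
      · have hA : (x :: cs).count o = cs.count o := by simp [hxo]
        have hB : (x :: cs).count c = cs.count c := by simp [hxc]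
        rw [pvScan_cons_other o c x hxo hxc, ih (t + 1) d, pvIdx_cons_ne hxo, pvIdx_cons_ne hxc,
            hA, hB]

-- per-bracket-type: A's inline block equals B's guarded depth scan
theorem block_eq_scan (s1 : List Char) (o c : Char) (hoc : o ≠ c) :
    pvBlockA s1 o c = (if o ∈ s1 ∧ c ∈ s1 then pvScan o c s1 0 else true) := by
  unfold pvBlockA
  by_cases hg : o ∈ s1 ∧ c ∈ s1
  · rw [if_pos hg, if_pos hg]
    have h := pvScan_eq o c hoc s1 0 0
    simp only [Nat.cast_zero, List.drop_zero] at h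
    rw [h]
    have hl1 : (pvIdx o s1 0).length = s1.count o := pvIdx_length o s1 0
    have hl2 : (pvIdx c s1 0).length = s1.count c := pvIdx_length c s1 0
    show (if ((pvIdx o s1 0).length != (pvIdx c s1 0).length) = true then false
          else pvLoopA (pvIdx o s1 0) (pvIdx c s1 0)) = _
    by_cases hlen : (pvIdx o s1 0).length = (pvIdx c s1 0).length
    · rw [if_neg (by simp [hlen])]
      have hd : decide ((s1.count o : Int) + 0 = s1.count c) = true := by
        rw [decide_eq_true_iff, ← hl1, ← hl2, hlen]
        omega
      rw [hd, Bool.true_and]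
    · rw [if_pos (by simp [hlen])]
      have hd : decide ((s1.count o : Int) + 0 = s1.count c) = false := by
        rw [decide_eq_false_iff_not, ← hl1, ← hl2]
        intro h'
        exact hlen (by omega)
      rw [hd, Bool.false_and]
  · rw [if_neg hg, if_neg hg]

-- ===== VERDICT (by name: the statement is the Claim_ definition above) =====
theorem check_pair_spec : Claim_equal_check_pair := by
  intro s _
  show check_pair s = check_pair_alt s
  unfold check_pair check_pair_alt
  by_cases hodd : (PySem.Int.mod (PySem.Str.len s) 2 != 0) = true
  · rw [if_pos hodd, if_pos hodd]
  · rw [if_neg hodd, if_neg hodd]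
    simp only [List.all_cons, List.all_nil, Bool.and_true]
    rw [block_eq_scan _ '(' ')' (by decide), block_eq_scan _ '[' ']' (by decide),
        block_eq_scan _ '{' '}' (by decide), Bool.and_assoc]
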